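-- pv_equiv track=rewrite | github.com/saschalamp/advent-of-code-2023 | day03/day03.py | number_coords
-- ===== SOURCE A (Python) =====
-- def number_coords(schematic: list[str]) -> list[tuple[int]]:
--     i = 0
--     current_number_start: int = None
--     numbers = []
--     while i < len(schematic):
--         if schematic[i].isdigit() and current_number_start is None:
--             current_number_start = i
--         elif not schematic[i].isdigit() and current_number_start is not None:
--             numbers.append((current_number_start, i - 1))
--             current_number_start = None
--         i += 1
--     if current_number_start is not None:
--         numbers.append((current_number_start, i - 1))
--     return numbers
-- ===== SOURCE B (Python) =====
-- from itertools import groupby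
--
--
-- def number_coords(schematic: list[str]) -> list[tuple[int]]:
--     numbers = []
--     for is_num, grp in groupby(enumerate(schematic), key=lambda pair: pair[1].isdigit()):
--         if is_num:
--             idxs = [i for i, _ in grp]
--             numbers.append((idxs[0], idxs[-1]))
--     return numbers
-- ===== Notes on version B (the rewrite author's own statement) =====
-- stated objective: idiomatic
-- what changed: Replaces the index/sentinel while-loop (current_number_start state machine with a post-loop flush) by itertools.groupby over enumerate keyed on isdigit, emitting each digit-run's first and last index per group with no carried state.
import Mathlib
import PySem

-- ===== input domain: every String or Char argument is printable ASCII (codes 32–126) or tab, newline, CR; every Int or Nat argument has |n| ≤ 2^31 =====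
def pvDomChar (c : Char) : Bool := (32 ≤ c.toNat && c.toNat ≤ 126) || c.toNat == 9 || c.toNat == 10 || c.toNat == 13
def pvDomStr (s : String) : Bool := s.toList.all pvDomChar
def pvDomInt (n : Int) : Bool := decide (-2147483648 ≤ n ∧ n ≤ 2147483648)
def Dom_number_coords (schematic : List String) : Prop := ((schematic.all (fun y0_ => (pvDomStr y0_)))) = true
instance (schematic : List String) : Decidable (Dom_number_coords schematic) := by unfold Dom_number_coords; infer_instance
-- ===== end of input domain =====

-- B is the same task written idiomatically: group-by-isdigit over the enumerated list instead of A's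
-- index/sentinel state machine; return values only (no mutation involved).

-- ===== PORT A =====
-- A's while-loop over index i with sentinel current_number_start, ported as structural
-- recursion over the remaining list carrying (i, current_number_start, numbers).
def pvAGo (i : Int) (cur : Option Int) (nums : List (List Int)) : List String → List (List Int)
  | [] => match cur with
    | some c => nums ++ [[c, i - 1]]
    | none => nums
  | s :: rest =>
    if PySem.Str.strIsdigit s && cur.isNone then
      pvAGo (i + 1) (some i) nums rest
    else if !PySem.Str.strIsdigit s && cur.isSome then
      pvAGo (i + 1) none (nums ++ [[cur.getD 0, i - 1]]) rest
    else
      pvAGo (i + 1) cur nums rest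

def number_coords (schematic : List String) : List (List Int) :=
  pvAGo 0 none [] schematic

-- ===== PORT B =====
-- Source B's groupby(enumerate(..), key=isdigit): each digit-group is consumed at once
-- (takeWhile/dropWhile = the group's items), emitting [first index, last index]; non-digit
-- groups are skipped element by element. No carried run state.
def pvBGo (i : Int) : List String → List (List Int)
  | [] => []
  | s :: rest =>
    if PySem.Str.strIsdigit s then
      let run := rest.takeWhile (fun t => PySem.Str.strIsdigit t)
      [i, i + run.length] :: pvBGo (i + run.length + 1) (rest.dropWhile (fun t => PySem.Str.strIsdigit t))
    else
      pvBGo (i + 1) rest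
termination_by l => l.length
decreasing_by
  · simpa using Nat.lt_succ_of_le (List.length_dropWhile_le _ _)
  · simp

def number_coords_alt (schematic : List String) : List (List Int) :=
  pvBGo 0 schematic

-- ===== PRECONDITION & SPEC =====
def Spec_number_coords (schematic : List String) (out : List (List Int)) : Prop := out = number_coords_alt schematic
instance (schematic : List String) (out : List (List Int)) : Decidable (Spec_number_coords schematic out) := by unfold Spec_number_coords; infer_instance

-- ===== CLAIM (what is proved, stated in full; the proofs are below) =====
def Claim_equal_number_coords : Prop := ∀ (schematic : List String), Dom_number_coords schematic → Spec_number_coords schematic (number_coords schematic)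

-- ===== LEMMAS AND PROOFS =====

-- "After a digit group": Source B's loop position right after a finished group — skip the one
-- non-digit element that ended it (if any) and continue with pvBGo.
def pvBTail (j : Int) : List String → List (List Int)
  | [] => []
  | _ :: ds => pvBGo (j + 1) ds

theorem pvBTail_congr (j j' : Int) (d : List String) (h : j = j') : pvBTail j d = pvBTail j' d := by rw [h]

theorem pvBGo_eq_tail (j : Int) (d : List String)
    (h : ∀ x, d.head? = some x → PySem.Str.strIsdigit x = false) :
    pvBGo j d = pvBTail j d := by
  cases d with
  | nil => rw [pvBGo.eq_def]; rfl
  | cons x ds =>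
    have hx : PySem.Chars.strIsdigit x.toList = false := h x rfl
    rw [pvBGo.eq_def, pvBTail]
    simp [hx]

-- Combined invariant, by strong induction on the list length:
-- (L1) in the "no current run" state A's loop produces nums ++ B's groups;
-- (L2) in the "inside a run started at c" state A's loop closes that run exactly where
--      the current takeWhile group ends, then continues like B after the group.
theorem pvMain (n : Nat) : ∀ (l : List String), l.length ≤ n →
    (∀ (i : Int) (nums : List (List Int)), pvAGo i none nums l = nums ++ pvBGo i l) ∧
    (∀ (i c : Int) (nums : List (List Int)),
      pvAGo i (some c) nums l =
        nums ++ [[c, i + (l.takeWhile (fun t => PySem.Str.strIsdigit t)).length - 1]] ++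
          pvBTail (i + (l.takeWhile (fun t => PySem.Str.strIsdigit t)).length)
            (l.dropWhile (fun t => PySem.Str.strIsdigit t))) := by
  induction n with
  | zero =>
    intro l hl
    have : l = [] := List.eq_nil_of_length_eq_zero (Nat.le_zero.mp hl)
    subst this
    exact ⟨fun i nums => by rw [pvBGo.eq_def]; simp [pvAGo],
           fun i c nums => by simp [pvAGo, pvBTail]⟩
  | succ n ih =>
    intro l hl
    cases l with
    | nil =>
      exact ⟨fun i nums => by rw [pvBGo.eq_def]; simp [pvAGo],
             fun i c nums => by simp [pvAGo, pvBTail]⟩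
    | cons s rest =>
      have hr : rest.length ≤ n := Nat.succ_le_succ_iff.mp hl
      obtain ⟨IH1, IH2⟩ := ih rest hr
      constructor
      · intro i nums
        by_cases hd : PySem.Str.strIsdigit s = true
        · rw [pvAGo, pvBGo.eq_def]
          simp only [hd, Option.isNone_none, Bool.and_self, if_true]
          rw [IH2 (i + 1) i nums]
          rw [pvBGo_eq_tail _ _ (by
            intro x hx
            have := List.head?_dropWhile_not (fun t => PySem.Str.strIsdigit t) rest
            rw [hx] at this; simpa using this)]
          rw [pvBTail_congr _ (i + (rest.takeWhile (fun t => PySem.Str.strIsdigit t)).length + 1) _ (by ring)]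
          simp
          ring
        · rw [pvAGo, pvBGo.eq_def]
          simp only [hd, Bool.false_and]
          simp only [Bool.false_eq_true, if_false]
          exact IH1 (i + 1) nums
      · intro i c nums
        by_cases hd : PySem.Str.strIsdigit s = true
        · rw [pvAGo]
          simp only [hd, Option.isNone_some, Bool.and_false, Bool.not_true, Bool.false_and,
            List.takeWhile_cons, List.dropWhile_cons]
          simp only [Bool.false_eq_true, if_false]
          rw [IH2 (i + 1) c nums]
          simp
          constructor
          · ring
          · exact pvBTail_congr _ _ _ (by ring)
        · rw [pvAGo]
          simp only [hd, Bool.false_and, Option.isSome_some, Bool.not_false, Bool.true_and,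
            List.takeWhile_cons, List.dropWhile_cons]
          simp only [Bool.false_eq_true, if_false, if_true]
          rw [IH1 (i + 1) (nums ++ [[Option.getD (some c) 0, i - 1]])]
          simp [pvBTail]

-- ===== VERDICT (by name: the statement is the Claim_ definition above) =====
theorem number_coords_spec : Claim_equal_number_coords := by
  intro schematic _
  unfold Spec_number_coords number_coords number_coords_alt
  simpa using (pvMain schematic.length schematic (le_refl _)).1 0 []
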